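-- pv_equiv track=rewrite | github.com/Belfagor2005/vavoo | usr/lib/enigma2/python/Plugins/Extensions/vavoo/resolver/hlsclient.py | parse_m3u_tag
-- ===== SOURCE A (Python) =====
-- def parse_m3u_tag(line):
--     if ':' not in line:
--         return line, []
--     tag, attribstr = line.split(':', 1)
--     attribs = []
--     last = 0
--     quote = False
--     for i, c in enumerate(attribstr+','):
--         if c == '"':
--             quote = not quote
--         if quote:
--             continue
--         if c == ',':
--             attribs.append(attribstr[last:i])
--             last = i+1
--     return tag, attribs
-- ===== SOURCE B (Python) =====
-- def parse_m3u_tag(line):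
--     i = line.find(':')
--     if i < 0:
--         return line, []
--     tag = line[:i]
--     fields = []
--     cur = ''
--     quote = False
--     for c in line[i + 1:] + ',':
--         if c == '"':
--             quote = not quote
--             cur += c
--         elif quote or c != ',':
--             cur += c
--         else:
--             fields.append(cur)
--             cur = ''
--     return tag, fields
-- ===== Notes on version B (the rewrite author's own statement) =====
-- stated objective: alternative
-- what changed: A locates the tag with a membership test plus a maxsplit-1 split and extracts each attribute by remembering the index of the last field boundary and slicing it out of the attribute string at every unquoted comma; B finds the first colon by index and slices the tag off, then builds each field character by character in a running string, appending the accumulated field when an unquoted comma arrives and silently dropping a still-open trailing field.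
import Mathlib
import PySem

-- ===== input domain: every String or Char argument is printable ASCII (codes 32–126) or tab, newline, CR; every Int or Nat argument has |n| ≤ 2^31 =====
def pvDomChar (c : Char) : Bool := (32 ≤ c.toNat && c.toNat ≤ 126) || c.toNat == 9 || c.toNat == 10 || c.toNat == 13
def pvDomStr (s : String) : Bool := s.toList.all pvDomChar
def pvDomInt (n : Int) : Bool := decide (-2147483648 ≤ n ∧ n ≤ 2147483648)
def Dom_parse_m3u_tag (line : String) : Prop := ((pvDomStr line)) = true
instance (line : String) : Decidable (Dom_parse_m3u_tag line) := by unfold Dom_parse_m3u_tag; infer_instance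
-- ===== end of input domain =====

-- B replaces A's 'in'/split-and-index-slice extraction with a find-the-colon wrapper and a
-- character-by-character scan that grows each field in a running string (objective: alternative).

-- ===== PORT A =====
-- A's loop state: (attribs, last, quote); one step per (index, char) of attribstr+','.
def pvAStep (cs : List Char) (st : List (List Char) × Int × Bool) (p : Int × Char) :
    List (List Char) × Int × Bool :=
  let quote := if p.2 = '"' then !st.2.2 else st.2.2
  if quote then (st.1, st.2.1, quote)
  else if p.2 = ',' then
    (st.1 ++ [PySem.Chars.slice cs (some st.2.1) (some p.1)], p.1 + 1, quote)
  else (st.1, st.2.1, quote)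

def pvAFields (cs : List Char) : List (List Char) :=
  ((PySem.List.enumerate (cs ++ [',']) 0).foldl (pvAStep cs) ([], 0, false)).1

def parse_m3u_tag (line : String) : String × List String :=
  if PySem.Str.isIn ":" line = false then (line, [])
  else
    let parts := (PySem.Str.splitMax? line ":" 1).getD []
    let tag := parts.getD 0 ""
    let attribstr := parts.getD 1 ""
    (tag, (pvAFields attribstr.toList).map String.ofList)

-- ===== PORT B =====
-- B's loop state: (fields, cur, quote); one step per character of line[i+1:]+','.
def pvBStep (st : List (List Char) × List Char × Bool) (c : Char) :
    List (List Char) × List Char × Bool :=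
  if c = '"' then (st.1, st.2.1 ++ ['"'], !st.2.2)
  else if st.2.2 || c ≠ ',' then (st.1, st.2.1 ++ [c], st.2.2)
  else (st.1 ++ [st.2.1], [], st.2.2)

def parse_m3u_tag_alt (line : String) : String × List String :=
  let i := PySem.Str.find line ":"
  if i < 0 then (line, [])
  else
    let tag := PySem.Str.slice line none (some i)
    let rest := PySem.Str.slice line (some (i + 1)) none
    (tag, (((rest.toList ++ [',']).foldl pvBStep ([], [], false)).1).map String.ofList)

-- ===== PRECONDITION & SPEC =====
def Spec_parse_m3u_tag (line : String) (out : String × List String) : Prop := out = parse_m3u_tag_alt line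
instance (line : String) (out : String × List String) : Decidable (Spec_parse_m3u_tag line out) := by unfold Spec_parse_m3u_tag; infer_instance

-- ===== CLAIM (what is proved, stated in full; the proofs are below) =====
def Claim_equal_parse_m3u_tag : Prop := ∀ (line : String), Dom_parse_m3u_tag line → Spec_parse_m3u_tag line (parse_m3u_tag line)

-- ===== LEMMAS AND PROOFS =====

-- Reference scan over attribstr+',' : cur is the field being built, q the quote parity.
def pvScan : List Char → List Char → Bool → List (List Char)
  | [], _, _ => []
  | c :: rest, cur, q =>
    if c = '"' then pvScan rest (cur ++ ['"']) (!q)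
    else if q then pvScan rest (cur ++ [c]) q
    else if c = ',' then cur :: pvScan rest [] q
    else pvScan rest (cur ++ [c]) q

-- ---- A-side characterization ----
theorem pvA_inv (cs : List Char) :
    ∀ (rest : List Char) (i last : Nat) (acc : List (List Char)) (q : Bool) (w : List Char),
      rest = (cs ++ [',']).drop i →
      (∀ j : Nat, i ≤ j → j ≤ cs.length →
        PySem.Chars.slice cs (some (last : Int)) (some (j : Int)) = w ++ rest.take (j - i)) →
      ((PySem.List.enumerate rest (i : Int)).foldl (pvAStep cs) (acc, (last : Int), q)).1
        = acc ++ pvScan rest w q := by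
  intro rest
  induction rest with
  | nil => intro i last acc q w _ _; simp [pvScan, PySem.List.enumerate_nil]
  | cons c rest' ih =>
    intro i last acc q w hdrop hw
    have hi : i ≤ cs.length := by
      by_contra h
      have : (cs ++ [',']).length ≤ i := by simp; omega
      rw [List.drop_eq_nil_of_le this] at hdrop
      exact (List.cons_ne_nil c rest') hdrop
    have hdrop' : rest' = (cs ++ [',']).drop (i + 1) := by
      have h1 : rest' = ((cs ++ [',']).drop i).drop 1 := by rw [← hdrop]; simp
      rw [h1, List.drop_drop]
    rw [PySem.List.enumerate_cons, List.foldl_cons]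
    by_cases hq2 : c = '"'
    · subst hq2
      have hstep : pvAStep cs (acc, (last : Int), q) ((i : Int), '"') = (acc, (last : Int), !q) := by
        cases q <;> simp [pvAStep]
      rw [hstep]
      have hcast : (i : Int) + 1 = ((i + 1 : Nat) : Int) := by push_cast; ring
      rw [hcast, ih (i + 1) last acc (!q) (w ++ ['"']) hdrop' ?_]
      · simp [pvScan]
      · intro j h1 h2
        have := hw j (by omega) h2
        rw [this]
        have hj : j - i = (j - (i + 1)) + 1 := by omega
        rw [hj, List.take_succ_cons, List.append_assoc]
        rfl
    · by_cases hcomma : c = ','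
      · by_cases hqt : q = true
        · subst hqt hcomma
          have hstep : pvAStep cs (acc, (last : Int), true) ((i : Int), ',') = (acc, (last : Int), true) := by
            simp [pvAStep]
          rw [hstep]
          have hcast : (i : Int) + 1 = ((i + 1 : Nat) : Int) := by push_cast; ring
          rw [hcast, ih (i + 1) last acc true (w ++ [',']) hdrop' ?_]
          · simp [pvScan]
          · intro j h1 h2
            have := hw j (by omega) h2
            rw [this]
            have hj : j - i = (j - (i + 1)) + 1 := by omega
            rw [hj, List.take_succ_cons, List.append_assoc]
            rfl
        · have hqf : q = false := by simpa using hqt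
          subst hqf hcomma
          have hsl : PySem.List.slice cs (some (last : Int)) (some (i : Int)) = w := by
            have := hw i le_rfl hi
            simpa using this
          have hstep : pvAStep cs (acc, (last : Int), false) ((i : Int), ',') =
              (acc ++ [w], (i : Int) + 1, false) := by
            simp [pvAStep, hsl]
          rw [hstep]
          have hcast : (i : Int) + 1 = ((i + 1 : Nat) : Int) := by push_cast; ring
          rw [hcast, ih (i + 1) (i + 1) (acc ++ [w]) false [] hdrop' ?_]
          · simp [pvScan]
          · intro j h1 h2
            have h0a : (0 : Int) ≤ ((i + 1 : Nat) : Int) := by positivity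
            have h0b : (0 : Int) ≤ (j : Nat) := by positivity
            rw [PySem.Chars.slice_eq_listSlice, PySem.List.slice_toNat cs h0a h0b]
            simp only [Int.toNat_natCast]
            have hrw : (cs ++ [',']).drop (i + 1) = cs.drop (i + 1) ++ [','] :=
              List.drop_append_of_le_length (by omega)
            rw [hdrop', hrw, List.take_append_of_le_length (by simp; omega)]
            simp
      · -- plain character
        have hstep : pvAStep cs (acc, (last : Int), q) ((i : Int), c) = (acc, (last : Int), q) := by
          cases q <;> simp [pvAStep, hq2, hcomma]
        rw [hstep]
        have hcast : (i : Int) + 1 = ((i + 1 : Nat) : Int) := by push_cast; ring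
        rw [hcast, ih (i + 1) last acc q (w ++ [c]) hdrop' ?_]
        · cases q <;> simp [pvScan, hq2, hcomma]
        · intro j h1 h2
          have := hw j (by omega) h2
          rw [this]
          have hj : j - i = (j - (i + 1)) + 1 := by omega
          rw [hj, List.take_succ_cons, List.append_assoc]
          rfl

theorem pvAFields_eq (cs : List Char) : pvAFields cs = pvScan (cs ++ [',']) [] false := by
  unfold pvAFields
  have h := pvA_inv cs (cs ++ [',']) 0 0 [] false [] (by simp) ?_
  · simpa using h
  · intro j h1 h2
    simp only [PySem.Chars.slice_eq_listSlice, Nat.cast_zero]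
    rw [PySem.List.slice_zero_start, PySem.List.slice_to cs (by positivity)]
    simp only [Int.toNat_natCast, Nat.sub_zero]
    rw [List.take_append_of_le_length h2]
    simp

-- ---- B-side characterization ----
theorem pvB_foldl :
    ∀ (l cur : List Char) (acc : List (List Char)) (q : Bool),
      ((l.foldl pvBStep (acc, cur, q)).1 = acc ++ pvScan l cur q) := by
  intro l
  induction l with
  | nil => intro cur acc q; simp [pvScan]
  | cons c rest ih =>
    intro cur acc q
    rw [List.foldl_cons]
    by_cases hq2 : c = '"'
    · subst hq2
      rw [show pvBStep (acc, cur, q) '"' = (acc, cur ++ ['"'], !q) by simp [pvBStep]]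
      rw [ih (cur ++ ['"']) acc (!q)]
      simp [pvScan]
    · by_cases hcm : c = ','
      · subst hcm
        cases q with
        | false =>
          rw [show pvBStep (acc, cur, false) ',' = (acc ++ [cur], [], false) by
            simp [pvBStep, hq2]]
          rw [ih [] (acc ++ [cur]) false]
          simp [pvScan, hq2]
        | true =>
          rw [show pvBStep (acc, cur, true) ',' = (acc, cur ++ [','], true) by
            simp [pvBStep, hq2]]
          rw [ih (cur ++ [',']) acc true]
          simp [pvScan, hq2]
      · rw [show pvBStep (acc, cur, q) c = (acc, cur ++ [c], q) by simp [pvBStep, hq2, hcm]]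
        rw [ih (cur ++ [c]) acc q]
        cases q <;> simp [pvScan, hq2, hcm]

-- ---- wrapper characterizations ----
theorem pv_singleton_infix {a : Char} {l : List Char} : [a] <:+: l ↔ a ∈ l := by
  constructor
  · rintro ⟨s, t, rfl⟩; simp
  · intro h
    obtain ⟨s, t, rfl⟩ := List.append_of_mem h
    exact ⟨s, t, by simp⟩

theorem pv_find_go_colon :
    ∀ (l : List Char) (k : Nat),
      PySem.Chars.find.go [':'] l k =
        if ':' ∈ l then ((k : Int) + (l.takeWhile (· ≠ ':')).length) else -1 := by
  intro l
  induction l with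
  | nil => intro k; simp [PySem.Chars.find.go]
  | cons c t ih =>
    intro k
    by_cases hc : c = ':'
    · subst hc
      have hpre : [':'].isPrefixOf (':' :: t) = true := by simp [List.isPrefixOf]
      simp [PySem.Chars.find.go, hpre, List.takeWhile]
    · have hpre : [':'].isPrefixOf (c :: t) = false := by
        simp [List.isPrefixOf]
        exact fun h => absurd h.symm hc
      rw [show PySem.Chars.find.go [':'] (c :: t) k = PySem.Chars.find.go [':'] t (k + 1) by
        simp [PySem.Chars.find.go, hpre]]
      rw [ih (k + 1)]
      by_cases hm : ':' ∈ t
      · rw [if_pos hm, if_pos (by simp [hm])]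
        rw [List.takeWhile_cons_of_pos (by simp [hc])]
        simp; ring
      · rw [if_neg hm, if_neg (by simp [hm]; exact fun h => absurd h.symm hc)]

theorem pv_find_colon (l : List Char) :
    PySem.Chars.find l [':'] =
      if ':' ∈ l then ((l.takeWhile (· ≠ ':')).length : Int) else -1 := by
  unfold PySem.Chars.find
  rw [pv_find_go_colon l 0]
  simp

theorem pv_splitgo_zero (sep : List Char) :
    ∀ (fuel : Nat) (l cur : List Char) (acc : List (List Char)),
      PySem.Chars.splitOnMax.go sep fuel 0 l cur acc = ((cur.reverse ++ l) :: acc).reverse := by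
  intro fuel l cur acc
  cases fuel with
  | zero => simp [PySem.Chars.splitOnMax.go]
  | succ fuel => cases l <;> simp [PySem.Chars.splitOnMax.go]

theorem pv_splitgo_one :
    ∀ (fuel : Nat) (l cur : List Char) (acc : List (List Char)), l.length ≤ fuel →
      PySem.Chars.splitOnMax.go [':'] fuel 1 l cur acc =
        if ':' ∈ l then
          acc.reverse ++ [cur.reverse ++ l.takeWhile (· ≠ ':'), (l.dropWhile (· ≠ ':')).tail]
        else acc.reverse ++ [cur.reverse ++ l] := by
  intro fuel
  induction fuel with
  | zero =>
    intro l cur acc hl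
    have : l = [] := List.eq_nil_of_length_eq_zero (by omega)
    subst this
    simp [PySem.Chars.splitOnMax.go]
  | succ fuel ih =>
    intro l cur acc hl
    cases l with
    | nil => simp [PySem.Chars.splitOnMax.go]
    | cons c t =>
      by_cases hc : c = ':'
      · subst hc
        have hpre : [':'].isPrefixOf (':' :: t) = true := by simp [List.isPrefixOf]
        rw [show PySem.Chars.splitOnMax.go [':'] (fuel + 1) 1 (':' :: t) cur acc =
            PySem.Chars.splitOnMax.go [':'] fuel 0 t [] (cur.reverse :: acc) by
          simp [PySem.Chars.splitOnMax.go, hpre]]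
        rw [pv_splitgo_zero]
        simp [List.takeWhile, List.dropWhile]
      · have hpre : [':'].isPrefixOf (c :: t) = false := by
          simp [List.isPrefixOf]
          exact fun h => absurd h.symm hc
        rw [show PySem.Chars.splitOnMax.go [':'] (fuel + 1) 1 (c :: t) cur acc =
            PySem.Chars.splitOnMax.go [':'] fuel 1 t (c :: cur) acc by
          simp [PySem.Chars.splitOnMax.go, hpre]]
        rw [ih t (c :: cur) acc (by simpa using hl)]
        by_cases hm : ':' ∈ t
        · rw [if_pos hm, if_pos (by simp [hm])]
          rw [List.takeWhile_cons_of_pos (by simp [hc]),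
            List.dropWhile_cons_of_pos (by simp [hc])]
          simp
        · rw [if_neg hm, if_neg (by simp [hm]; exact fun h => absurd h.symm hc)]
          simp

theorem pv_splitOnMax_colon (l : List Char) :
    PySem.Chars.splitOnMax l [':'] 1 =
      if ':' ∈ l then [l.takeWhile (· ≠ ':'), (l.dropWhile (· ≠ ':')).tail] else [l] := by
  unfold PySem.Chars.splitOnMax
  rw [if_neg (by omega)]
  simp only [Int.toNat_one]
  rw [pv_splitgo_one (l.length + 1) l [] [] (by omega)]
  split <;> simp

theorem pv_colon_toList : (":" : String).toList = [':'] := by decide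

-- take/drop around the first colon
theorem pv_take_tw (p : Char → Bool) (l : List Char) :
    l.take (l.takeWhile p).length = l.takeWhile p :=
  (List.prefix_iff_eq_take.mp (List.takeWhile_prefix _)).symm

theorem pv_drop_tw (p : Char → Bool) (l : List Char) :
    l.drop ((l.takeWhile p).length + 1) = (l.dropWhile p).tail := by
  rw [show l.drop ((l.takeWhile p).length + 1)
      = (l.takeWhile p ++ l.dropWhile p).drop ((l.takeWhile p).length + 1) by
    rw [List.takeWhile_append_dropWhile]]
  rw [List.drop_append]
  simp [List.drop_one]

-- ===== VERDICT (by name: the statement is the Claim_ definition above) =====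
theorem parse_m3u_tag_spec : Claim_equal_parse_m3u_tag := by
  intro line _
  unfold Spec_parse_m3u_tag parse_m3u_tag parse_m3u_tag_alt
  by_cases hm : ':' ∈ line.toList
  · -- colon present: both take the split branch
    have hin : PySem.Str.isIn ":" line = true := by
      simp only [PySem.Str.isIn_eq, pv_colon_toList]
      exact (PySem.Chars.isIn_iff_infix _ _).mpr (pv_singleton_infix.mpr hm)
    have hfind : PySem.Str.find line ":" =
        ((line.toList.takeWhile (· ≠ ':')).length : Int) := by
      simp only [PySem.Str.find_eq, pv_colon_toList]
      rw [pv_find_colon, if_pos hm]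
    have hsplit : PySem.Str.splitMax? line ":" 1 =
        some [String.ofList (line.toList.takeWhile (· ≠ ':')),
              String.ofList ((line.toList.dropWhile (· ≠ ':')).tail)] := by
      unfold PySem.Str.splitMax?
      rw [pv_colon_toList]
      unfold PySem.Chars.splitMax?
      rw [if_neg (by simp)]
      rw [pv_splitOnMax_colon, if_pos hm]
      rfl
    rw [hin, hfind, hsplit]
    simp only [Bool.true_eq_false, if_false, Option.getD_some]
    rw [if_neg (by exact not_lt.mpr (by positivity))]
    have htag : PySem.Str.slice line none (some ((line.toList.takeWhile (· ≠ ':')).length : Int))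
        = String.ofList (line.toList.takeWhile (· ≠ ':')) := by
      apply String.toList_inj.mp
      rw [PySem.Str.toList_slice, PySem.Chars.slice_eq_listSlice,
        PySem.List.slice_to line.toList (by positivity)]
      simp
      exact pv_take_tw _ _
    have hrest : (PySem.Str.slice line
        (some (((line.toList.takeWhile (· ≠ ':')).length : Int) + 1)) none).toList
        = (line.toList.dropWhile (· ≠ ':')).tail := by
      rw [PySem.Str.toList_slice, PySem.Chars.slice_eq_listSlice]
      rw [show (((line.toList.takeWhile (· ≠ ':')).length : Int) + 1)
          = (((line.toList.takeWhile (· ≠ ':')).length + 1 : Nat) : Int) by push_cast; ring]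
      rw [PySem.List.slice_from line.toList (by positivity)]
      simp
      exact pv_drop_tw _ _
    rw [htag, hrest]
    simp only [List.getD_cons_zero, List.getD_cons_succ, Prod.mk.injEq, true_and]
    have hlist : String.toList (String.ofList ((line.toList.dropWhile (· ≠ ':')).tail))
        = (line.toList.dropWhile (· ≠ ':')).tail := by simp
    rw [hlist, pvAFields_eq, pvB_foldl]
    simp
  · -- no colon: both return (line, [])
    have hin : PySem.Str.isIn ":" line = false := by
      simp only [PySem.Str.isIn_eq, pv_colon_toList]
      exact (PySem.Chars.isIn_eq_false_iff _ _).mpr (fun h => hm (pv_singleton_infix.mp h))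
    have hfind : PySem.Str.find line ":" = -1 := by
      simp only [PySem.Str.find_eq, pv_colon_toList]
      rw [pv_find_colon, if_neg hm]
    rw [hin, hfind]
    norm_num
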